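-- pv_equiv track=rewrite | github.com/KosinskiJ/nubers2text | numbers_converter/utils.py | cut_on_group
-- ===== SOURCE A (Python) =====
-- def cut_on_group(list_number):
--     list_number = list_number[::-1]
--     i = 0
--     a = []
--     while len(list_number[i:i + 3]) != 0:
--         b = list_number[i:i + 3]
--         a.append(b[::-1])
--         i += 3
--     return a[::-1]
-- ===== SOURCE B (Python) =====
-- def cut_on_group(list_number):
--     n = len(list_number)
--     start = n % 3
--     groups = []
--     if start:
--         groups.append(list_number[:start])
--     for i in range(start, n, 3):
--         groups.append(list_number[i:i + 3])
--     return groups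
-- ===== Notes on version B (the rewrite author's own statement) =====
-- stated objective: simpler
-- what changed: Single forward pass keyed on n % 3 (a short leading group, then slices of 3) instead of reversing the list, chunking the reversal, reversing each chunk and reversing the result.
import Mathlib
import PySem

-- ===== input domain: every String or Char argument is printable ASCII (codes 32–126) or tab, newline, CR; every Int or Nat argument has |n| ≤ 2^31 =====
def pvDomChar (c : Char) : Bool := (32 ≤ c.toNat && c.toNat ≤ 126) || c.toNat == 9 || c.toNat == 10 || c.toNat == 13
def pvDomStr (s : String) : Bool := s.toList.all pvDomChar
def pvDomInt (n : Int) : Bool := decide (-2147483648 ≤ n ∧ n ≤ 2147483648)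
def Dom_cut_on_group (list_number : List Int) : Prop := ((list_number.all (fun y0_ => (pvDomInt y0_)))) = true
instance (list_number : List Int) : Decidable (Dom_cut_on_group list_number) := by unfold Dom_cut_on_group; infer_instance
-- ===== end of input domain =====

-- B groups the list into threes from the right in one forward pass keyed on len % 3,
-- instead of A's reverse / chunk-the-reversal / reverse-each-chunk / reverse-the-result; objective: simpler.

-- ===== PORT A =====
-- the while loop: condition 'len(list_number[i:i+3]) != 0', body appends b[::-1] and steps i by 3
def cutOnGroupLoop (ys : List Int) (i : Nat) (a : List (List Int)) : List (List Int) :=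
  if (PySem.List.slice ys (some (i : Int)) (some ((i : Int) + 3))).length ≠ 0 then
    cutOnGroupLoop ys (i + 3)
      (a ++ [(PySem.List.slice ys (some (i : Int)) (some ((i : Int) + 3))).reverse])
  else a
termination_by ys.length - i
decreasing_by
  rename_i h
  rw [show ((i : Int) + 3) = ((i : Int) + ((3 : Nat) : Int)) by norm_num,
      PySem.List.slice_natCast_add] at h
  have hi : i < ys.length := by
    by_contra hc
    simp [List.drop_eq_nil_of_le (by omega : ys.length ≤ i)] at h
  omega

-- 'list_number = list_number[::-1]' is a reversal (PySem.List.slice?_none_none_neg_one); 'return a[::-1]' likewise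
def cut_on_group (list_number : List Int) : List (List Int) :=
  (cutOnGroupLoop list_number.reverse 0 []).reverse

-- ===== PORT B =====
def cut_on_group_alt (list_number : List Int) : List (List Int) :=
  let n : Int := list_number.length
  let start : Int := PySem.Int.mod n 3
  let groups : List (List Int) :=
    if start ≠ 0 then [PySem.List.slice list_number none (some start)] else []
  (PySem.List.pyRange start n 3).foldl
    (fun acc i => acc ++ [PySem.List.slice list_number (some i) (some (i + 3))]) groups

-- ===== PRECONDITION & SPEC =====
def Spec_cut_on_group (list_number : List Int) (out : List (List Int)) : Prop := out = cut_on_group_alt list_number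
instance (list_number : List Int) (out : List (List Int)) : Decidable (Spec_cut_on_group list_number out) := by unfold Spec_cut_on_group; infer_instance

-- ===== CLAIM (what is proved, stated in full; the proofs are below) =====
def Claim_equal_cut_on_group : Prop := ∀ (list_number : List Int), Dom_cut_on_group list_number → Spec_cut_on_group list_number (cut_on_group list_number)

-- ===== LEMMAS AND PROOFS =====

-- what A's loop computes on the reversed list: chunks of 3 from the front, each reversed
def chunkRev : List Int → List (List Int)
  | [] => []
  | z :: zs => ((z :: zs).take 3).reverse :: chunkRev (zs.drop 2)
termination_by l => l.length
decreasing_by simp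

lemma loop_eq (ys : List Int) : ∀ i a, cutOnGroupLoop ys i a = a ++ chunkRev (ys.drop i) := by
  have key : ∀ m i a, ys.length - i ≤ m → cutOnGroupLoop ys i a = a ++ chunkRev (ys.drop i) := by
    intro m
    induction m with
    | zero =>
      intro i a h
      rw [cutOnGroupLoop,
        show ((i : Int) + 3) = ((i : Int) + ((3 : Nat) : Int)) by norm_num,
        PySem.List.slice_natCast_add, List.drop_eq_nil_of_le (by omega : ys.length ≤ i)]
      simp [chunkRev]
    | succ m ih =>
      intro i a h
      rw [cutOnGroupLoop,
        show ((i : Int) + 3) = ((i : Int) + ((3 : Nat) : Int)) by norm_num,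
        PySem.List.slice_natCast_add]
      cases hd : ys.drop i with
      | nil => simp [chunkRev]
      | cons z zs =>
        have hi : i < ys.length := by
          by_contra hc
          rw [List.drop_eq_nil_of_le (by omega : ys.length ≤ i)] at hd
          simp at hd
        rw [if_pos (by simp)]
        rw [ih (i + 3) _ (by omega)]
        have hdd : ys.drop (i + 3) = zs.drop 2 := by
          rw [show i + 3 = i + 3 from rfl, ← List.drop_drop, hd]
          rfl
        rw [hdd, chunkRev]
        simp
  exact fun i a => key (ys.length - i) i a le_rfl

lemma alt_nil : cut_on_group_alt [] = [] := by decide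

lemma alt_small (xs : List Int) (h1 : xs ≠ []) (h2 : xs.length ≤ 3) :
    cut_on_group_alt xs = [xs] := by
  rcases xs with _ | ⟨a, _ | ⟨b, _ | ⟨c, _ | ⟨d, t⟩⟩⟩⟩
  · exact absurd rfl h1
  · rfl
  · rfl
  · simp [cut_on_group_alt, PySem.Int.mod, PySem.List.pyRange, PySem.List.slice_to]
  · simp at h2; omega

lemma pyRange3_split (p r : Nat) :
    PySem.List.pyRange (r : Int) ((3 * (p + 1) + r : Nat) : Int) 3 =
      PySem.List.pyRange (r : Int) (((3 * (p + 1) + r : Nat) : Int) - 3) 3 ++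
        [((3 * (p + 1) + r : Nat) : Int) - 3] := by
  rw [PySem.List.pyRange_of_pos _ _ (by norm_num : (0:Int) < 3),
      PySem.List.pyRange_of_pos _ _ (by norm_num : (0:Int) < 3)]
  rw [if_pos (by push_cast; omega)]
  have h1 : ((((3 * (p + 1) + r : Nat) : Int) - r + 3 - 1) / 3).toNat = p + 1 := by
    push_cast; omega
  have h2 : (if (r:Int) < ((3 * (p + 1) + r : Nat) : Int) - 3 then ((((3 * (p + 1) + r : Nat) : Int) - 3 - r + 3 - 1) / 3).toNat else 0) = p := by
    by_cases hc : (r:Int) < ((3 * (p + 1) + r : Nat) : Int) - 3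
    · rw [if_pos hc]; push_cast; omega
    · rw [if_neg hc]; push_cast at hc; omega
  rw [h1, h2, List.range_succ, List.map_append]
  congr 1
  simp only [List.map_cons, List.map_nil]
  congr 1
  push_cast; omega

lemma alt_rec (xs : List Int) (h : 3 < xs.length) :
    cut_on_group_alt xs =
      cut_on_group_alt (xs.take (xs.length - 3)) ++ [xs.drop (xs.length - 3)] := by
  obtain ⟨p, r, hn, hr⟩ : ∃ p r, xs.length = 3 * (p + 1) + r ∧ r < 3 :=
    ⟨xs.length / 3 - 1, xs.length % 3, by omega, by omega⟩
  have hlen : (xs.take (xs.length - 3)).length = xs.length - 3 := by simp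
  unfold cut_on_group_alt
  simp only [hlen]
  have hmod : PySem.Int.mod ((xs.length : Nat) : Int) 3 = (r : Int) := by
    rw [PySem.Int.mod_eq_emod_of_pos (by norm_num)]; omega
  have hmod' : PySem.Int.mod ((xs.length - 3 : Nat) : Int) 3 = (r : Int) := by
    rw [PySem.Int.mod_eq_emod_of_pos (by norm_num)]; omega
  have hcast : ((xs.length : Nat) : Int) = ((3 * (p + 1) + r : Nat) : Int) := by rw [hn]
  have hcast' : ((xs.length - 3 : Nat) : Int) = ((3 * (p + 1) + r : Nat) : Int) - 3 := by
    rw [hn]; push_cast; omega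
  rw [hmod, hmod', hcast, hcast', pyRange3_split p r, List.foldl_append]
  have hgroups : (if (r : Int) ≠ 0 then [PySem.List.slice (xs.take (xs.length - 3)) none (some (r : Int))] else []) =
      (if (r : Int) ≠ 0 then [PySem.List.slice xs none (some (r : Int))] else []) := by
    by_cases hzero : (r : Int) ≠ 0
    · rw [if_pos hzero, if_pos hzero, PySem.List.slice_to_natCast, PySem.List.slice_to_natCast,
        List.take_take, show min r (xs.length - 3) = r by omega]
    · rw [if_neg hzero, if_neg hzero]
  rw [hgroups]
  have hcongr : ∀ (init : List (List Int)),
      (PySem.List.pyRange (r : Int) (((3 * (p + 1) + r : Nat) : Int) - 3) 3).foldl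
        (fun acc i => acc ++ [PySem.List.slice xs (some i) (some (i + 3))]) init =
      (PySem.List.pyRange (r : Int) (((3 * (p + 1) + r : Nat) : Int) - 3) 3).foldl
        (fun acc i => acc ++ [PySem.List.slice (xs.take (xs.length - 3)) (some i) (some (i + 3))]) init := by
    intro init
    apply PySem.List.foldl_congr_mem
    intro acc i hi
    rw [PySem.List.mem_pyRange_iff_of_pos (by norm_num : (0:Int) < 3)] at hi
    obtain ⟨hi1, hi2, hi3⟩ := hi
    have hb : i.toNat + 3 ≤ xs.length - 3 := by omega
    rw [PySem.List.slice_toNat _ (by omega) (by omega),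
        PySem.List.slice_toNat _ (by omega) (by omega),
        List.drop_take,
        show (i + 3).toNat - i.toNat = 3 by omega,
        List.take_take, show min 3 (xs.length - 3 - i.toNat) = 3 by omega]
  rw [hcongr]
  simp only [List.foldl_cons, List.foldl_nil]
  rw [PySem.List.slice_toNat _ (by push_cast; omega) (by push_cast; omega)]
  rw [show (((3 * (p + 1) + r : Nat) : Int) - 3 + 3).toNat - (((3 * (p + 1) + r : Nat) : Int) - 3).toNat = 3 by push_cast; omega,
      show (((3 * (p + 1) + r : Nat) : Int) - 3).toNat = xs.length - 3 by push_cast; omega]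
  have hd3 : (List.drop (xs.length - 3) xs).length ≤ 3 := by
    rw [List.length_drop]; omega
  rw [List.take_of_length_le hd3]

lemma main_eq : ∀ xs : List Int, (chunkRev xs.reverse).reverse = cut_on_group_alt xs := by
  have H : ∀ n (xs : List Int), xs.length ≤ n →
      (chunkRev xs.reverse).reverse = cut_on_group_alt xs := by
    intro n
    induction n with
    | zero =>
      intro xs h
      have hx : xs = [] := List.eq_nil_of_length_eq_zero (by omega)
      rw [hx]
      simp [chunkRev, alt_nil]
    | succ n ih =>
      intro xs h
      cases hxs : xs.reverse with
      | nil =>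
        have hx : xs = [] := by simpa using congrArg List.reverse hxs
        rw [hx]
        simp [chunkRev, alt_nil]
      | cons z zs =>
        have hne : xs ≠ [] := by
          intro e; rw [e] at hxs; simp at hxs
        rw [chunkRev]
        have h1 : (z :: zs).take 3 = (xs.drop (xs.length - 3)).reverse := by
          rw [← hxs, List.take_reverse]
        have h2 : zs.drop 2 = (xs.take (xs.length - 3)).reverse := by
          rw [show zs.drop 2 = (z :: zs).drop 3 from rfl, ← hxs, List.drop_reverse]
        rw [h1, h2, List.reverse_cons, List.reverse_reverse,
          ih (xs.take (xs.length - 3)) (by rw [List.length_take]; omega)]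
        by_cases h3 : 3 < xs.length
        · rw [alt_rec xs h3]
        · have h0 : xs.length - 3 = 0 := by omega
          rw [h0, List.take_zero, List.drop_zero, alt_nil,
            alt_small xs hne (by omega), List.nil_append]
  exact fun xs => H xs.length xs le_rfl

-- ===== VERDICT (by name: the statement is the Claim_ definition above) =====
theorem cut_on_group_spec : Claim_equal_cut_on_group := by
  intro xs _
  show cut_on_group xs = cut_on_group_alt xs
  rw [cut_on_group, loop_eq]
  simpa using main_eq xs
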